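-- pv_equiv track=rewrite | github.com/BlessedLongsword/Advent-of-Code-2021 | 19/puzzle19.py | getPer
-- ===== SOURCE A (Python) =====
-- def getPer(p1, p2):
--     if p1 == 0:
--         return p2
--     elif p1 == 1:
--         if p2 == 1:
--             return 0
--         elif p2 == 2:
--             return 4
--         elif p2 == 3:
--             return 5
--         elif p2 == 4:
--             return 2
--         elif p2 == 5:
--             return 3
--         else:
--             return getPer(p2, p1)
--     elif p1 == 2:
--         if p2 == 2:
--             return 3
--         elif p2 == 3:
--             return 1
--         elif p2 == 4:
--             return 5
--         elif p2 == 5: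
--             return 4
--         else:
--             return getPer(p2, p1)
--     elif p1 == 3:
--         if p2 == 3:
--             return 4
--         elif p2 == 4:
--             return 0
--         elif p2 == 5:
--             return 1
--         else:
--             return getPer(p2, p1)
--     elif p1 == 4:
--         if p2 == 4:
--             return 3
--         elif p2 == 5:
--             return 2
--         else:
--             return getPer(p2, p1)
--     elif p1 == 5:
--         if p2 == 5:
--             return 0
--         else:
--             return getPer(p2, p1)
-- ===== SOURCE B (Python) =====
-- _TABLE = {
--     (1, 0): 1, (1, 1): 0, (1, 2): 4, (1, 3): 5, (1, 4): 2, (1, 5): 3,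
--     (2, 0): 2, (2, 1): 4, (2, 2): 3, (2, 3): 1, (2, 4): 5, (2, 5): 4,
--     (3, 0): 3, (3, 1): 5, (3, 2): 1, (3, 3): 4, (3, 4): 0, (3, 5): 1,
--     (4, 0): 4, (4, 1): 2, (4, 2): 5, (4, 3): 0, (4, 4): 3, (4, 5): 2,
--     (5, 0): 5, (5, 1): 3, (5, 2): 4, (5, 3): 1, (5, 4): 2, (5, 5): 0,
-- }
--
-- def getPer(p1, p2):
--     if p1 == 0:
--         return p2
--     return _TABLE.get((p1, p2))
-- ===== Notes on version B (the rewrite author's own statement) =====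
-- stated objective: simpler
-- what changed: Replaces the 5-way branch tree with argument-swapping recursion by a single precomputed 30-entry lookup table keyed by (p1, p2), keeping only the p1==0 identity guard.
-- outside the precondition, e.g. on getPer(6, 0): A returns None, B returns None; on getPer(1, 7): A returns None, B returns None
import Mathlib
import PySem

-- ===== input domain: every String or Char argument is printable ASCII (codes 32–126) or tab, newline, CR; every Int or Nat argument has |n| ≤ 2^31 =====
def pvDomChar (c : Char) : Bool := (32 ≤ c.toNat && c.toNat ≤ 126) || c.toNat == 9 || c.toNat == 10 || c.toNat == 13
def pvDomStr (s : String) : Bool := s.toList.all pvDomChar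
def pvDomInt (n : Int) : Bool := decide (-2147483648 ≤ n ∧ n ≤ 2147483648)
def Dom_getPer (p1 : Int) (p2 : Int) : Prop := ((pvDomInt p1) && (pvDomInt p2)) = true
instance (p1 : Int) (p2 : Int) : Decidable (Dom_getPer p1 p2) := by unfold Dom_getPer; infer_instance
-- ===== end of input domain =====

-- B replaces A's branch tree with argument-swapping recursion by one precomputed lookup table (objective: simpler).
-- A returns None (no Int) when p1 ≠ 0 and (p1,p2) is outside 1..5 × 0..5; Pre_ excludes exactly those inputs.

-- ===== PORT A =====
-- none = Python's implicit None; fuel bounds the swap recursion (Python's depth is at most 2, so fuel 2 is exact)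
def getPerAux : Nat → Int → Int → Option Int
  | 0, _, _ => none
  | fuel+1, p1, p2 =>
    if p1 == 0 then some p2
    else if p1 == 1 then
      if p2 == 1 then some 0
      else if p2 == 2 then some 4
      else if p2 == 3 then some 5
      else if p2 == 4 then some 2
      else if p2 == 5 then some 3
      else getPerAux fuel p2 p1
    else if p1 == 2 then
      if p2 == 2 then some 3
      else if p2 == 3 then some 1
      else if p2 == 4 then some 5
      else if p2 == 5 then some 4
      else getPerAux fuel p2 p1
    else if p1 == 3 then
      if p2 == 3 then some 4
      else if p2 == 4 then some 0
      else if p2 == 5 then some 1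
      else getPerAux fuel p2 p1
    else if p1 == 4 then
      if p2 == 4 then some 3
      else if p2 == 5 then some 2
      else getPerAux fuel p2 p1
    else if p1 == 5 then
      if p2 == 5 then some 0
      else getPerAux fuel p2 p1
    else none

def getPer (p1 : Int) (p2 : Int) : Int := (getPerAux 2 p1 p2).getD 0

-- ===== PORT B =====
def pvTable : PySem.Dict (Int × Int) Int := PySem.Dict.ofList
  [((1, 0), 1), ((1, 1), 0), ((1, 2), 4), ((1, 3), 5), ((1, 4), 2), ((1, 5), 3),
   ((2, 0), 2), ((2, 1), 4), ((2, 2), 3), ((2, 3), 1), ((2, 4), 5), ((2, 5), 4),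
   ((3, 0), 3), ((3, 1), 5), ((3, 2), 1), ((3, 3), 4), ((3, 4), 0), ((3, 5), 1),
   ((4, 0), 4), ((4, 1), 2), ((4, 2), 5), ((4, 3), 0), ((4, 4), 3), ((4, 5), 2),
   ((5, 0), 5), ((5, 1), 3), ((5, 2), 4), ((5, 3), 1), ((5, 4), 2), ((5, 5), 0)]

def getPer_alt (p1 : Int) (p2 : Int) : Int :=
  if p1 == 0 then p2 else (PySem.Dict.get? pvTable (p1, p2)).getD 0

-- ===== PRECONDITION & SPEC =====
-- Pre_ excludes exactly the inputs on which Python A falls off every branch and returns None (not an int).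
def Pre_getPer (p1 : Int) (p2 : Int) : Prop :=
  p1 = 0 ∨ (1 ≤ p1 ∧ p1 ≤ 5 ∧ 0 ≤ p2 ∧ p2 ≤ 5)
instance (p1 : Int) (p2 : Int) : Decidable (Pre_getPer p1 p2) := by unfold Pre_getPer; infer_instance

def pvWitness_getPer : Int × Int := (2, 1)

def Spec_getPer (p1 : Int) (p2 : Int) (out : Int) : Prop := out = getPer_alt p1 p2
instance (p1 : Int) (p2 : Int) (out : Int) : Decidable (Spec_getPer p1 p2 out) := by unfold Spec_getPer; infer_instance

-- ===== CLAIM (what is proved, stated in full; the proofs are below) =====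
def Claim_equal_getPer : Prop := ∀ (p1 : Int) (p2 : Int), Dom_getPer p1 p2 → Pre_getPer p1 p2 → Spec_getPer p1 p2 (getPer p1 p2)

-- ===== LEMMAS AND PROOFS =====

-- ===== VERDICT (by name: the statement is the Claim_ definition above) =====
theorem getPer_spec : Claim_equal_getPer := by
  intro p1 p2 _ hpre
  unfold Spec_getPer
  rcases hpre with h0 | ⟨h1, h2, h3, h4⟩
  · subst h0; simp [getPer, getPerAux, getPer_alt]
  · interval_cases p1 <;> interval_cases p2 <;> decide
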